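-- pv_equiv track=rewrite | github.com/mihir254/LeetCode | Medium/34-Find-First-and-Last-Position-of-Element-in-Sorted-Array.py | findBound
-- ===== SOURCE A (Python) =====
-- def findBound(arr, tgt, bound):
--     left, right = 0, len(arr)-1
--     while left <= right:
--         mid = (left + right) // 2
--         if arr[mid] == tgt:
--             if bound == "lower":
--                 if mid == left or arr[mid-1] < tgt:
--                     return mid
--                 else:
--                     right = mid-1
--             else:
--                 if mid == len(arr)-1 or arr[mid+1] > tgt:
--                     return mid
--                 else:
--                     left = mid+1
--         elif arr[mid] < tgt:
--             left = mid + 1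
--         else:
--             right = mid - 1
--     return -1
-- ===== SOURCE B (Python) =====
-- def findBound(arr, tgt, bound):
--     n = len(arr)
--     if bound == "lower":
--         lo, hi = 0, n
--         while lo < hi:
--             mid = (lo + hi) // 2
--             if arr[mid] < tgt:
--                 lo = mid + 1
--             else:
--                 hi = mid
--         return lo if lo < n and arr[lo] == tgt else -1
--     else:
--         lo, hi = 0, n
--         while lo < hi:
--             mid = (lo + hi) // 2
--             if arr[mid] <= tgt:
--                 lo = mid + 1
--             else:
--                 hi = mid
--         return lo - 1 if lo > 0 and arr[lo - 1] == tgt else -1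
-- ===== Notes on version B (the rewrite author's own statement) =====
-- stated objective: alternative
-- what changed: Replaces A's match-and-refine binary search (early returns on arr[mid]==tgt with neighbour tests) by the classic insertion-point binary search over a half-open interval with no equality tests inside the loop, followed by one final index/equality check; Pre_ keeps sorted arrays and all arrays not containing tgt (where both programs provably return -1), excluding only unsorted arrays that contain tgt, on which a binary search's answer is an accident of probe order.
-- outside the precondition, e.g. on findBound([1, 0], 1, 'lower'): A returns 0, B returns -1
import Mathlib
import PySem

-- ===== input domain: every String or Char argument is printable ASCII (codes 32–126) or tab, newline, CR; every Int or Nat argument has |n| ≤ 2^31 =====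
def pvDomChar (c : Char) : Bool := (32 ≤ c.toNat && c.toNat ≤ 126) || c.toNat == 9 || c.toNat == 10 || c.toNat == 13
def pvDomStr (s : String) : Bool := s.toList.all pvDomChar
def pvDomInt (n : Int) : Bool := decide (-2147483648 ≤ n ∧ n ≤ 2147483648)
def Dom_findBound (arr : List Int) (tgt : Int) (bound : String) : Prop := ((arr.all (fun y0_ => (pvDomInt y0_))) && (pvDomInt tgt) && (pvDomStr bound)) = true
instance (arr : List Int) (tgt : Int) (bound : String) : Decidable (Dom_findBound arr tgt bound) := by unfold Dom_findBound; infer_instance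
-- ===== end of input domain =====

-- B replaces A's match-and-refine binary search by the classic insertion-point binary search
-- (half-open interval, no equality tests inside the loop) plus one final check; same cost.

-- ===== PORT A =====
-- A's while-loop: left/right are Python ints, mid = (left+right)//2, arr[...] via PySem.
def loopA (arr : List Int) (tgt : Int) (bound : String) (left right : Int) : Int :=
  if _h : left ≤ right then
    let mid := PySem.Int.floordiv (left + right) 2
    let v := PySem.List.pyGetD arr mid 0
    if v == tgt then
      if bound == "lower" then
        if mid == left then mid
        else if PySem.List.pyGetD arr (mid - 1) 0 < tgt then mid
        else loopA arr tgt bound left (mid - 1)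
      else
        if mid == PySem.List.len arr - 1 then mid
        else if tgt < PySem.List.pyGetD arr (mid + 1) 0 then mid
        else loopA arr tgt bound (mid + 1) right
    else if v < tgt then loopA arr tgt bound (mid + 1) right
    else loopA arr tgt bound left (mid - 1)
  else -1
termination_by (right + 1 - left).toNat
decreasing_by
  all_goals
    have hb := PySem.Int.floordiv_two_mid_bounds (lo := left) (hi := right) _h
    omega

def findBound (arr : List Int) (tgt : Int) (bound : String) : Int :=
  loopA arr tgt bound 0 (PySem.List.len arr - 1)

-- ===== PORT B =====
-- leftmost index i in [lo,hi) with arr[i] >= tgt (insertion point, bisect_left style)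
def bisLow (arr : List Int) (tgt : Int) (lo hi : Nat) : Nat :=
  if _h : lo < hi then
    let mid := (lo + hi) / 2
    if arr.getD mid 0 < tgt then bisLow arr tgt (mid + 1) hi
    else bisLow arr tgt lo mid
  else lo
termination_by hi - lo
decreasing_by all_goals omega

-- leftmost index i in [lo,hi) with arr[i] > tgt (bisect_right style)
def bisUp (arr : List Int) (tgt : Int) (lo hi : Nat) : Nat :=
  if _h : lo < hi then
    let mid := (lo + hi) / 2
    if arr.getD mid 0 ≤ tgt then bisUp arr tgt (mid + 1) hi
    else bisUp arr tgt lo mid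
  else lo
termination_by hi - lo
decreasing_by all_goals omega

def findBound_alt (arr : List Int) (tgt : Int) (bound : String) : Int :=
  let n := arr.length
  if bound == "lower" then
    let lo := bisLow arr tgt 0 n
    if lo < n ∧ arr.getD lo 0 = tgt then (lo : Int) else -1
  else
    let lo := bisUp arr tgt 0 n
    if 0 < lo ∧ arr.getD (lo - 1) 0 = tgt then (lo : Int) - 1 else -1

-- ===== PRECONDITION & SPEC =====
-- Pre_ excludes only those unsorted arrays that contain tgt: binary search is specified for
-- sorted input (the LeetCode task's domain), and on an unsorted array containing tgt the value
-- either program returns is an accident of its probe order (e.g. [1,0], 1, "lower": A returns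
-- 0, B returns -1); when tgt does not occur at all, both programs return -1 even unsorted,
-- so those inputs stay inside the claim.
def Pre_findBound (arr : List Int) (tgt : Int) (bound : String) : Prop :=
  arr.Pairwise (· ≤ ·) ∨ tgt ∉ arr
instance (arr : List Int) (tgt : Int) (bound : String) : Decidable (Pre_findBound arr tgt bound) := by
  unfold Pre_findBound; infer_instance

def pvWitness_findBound : List Int × Int × String := ([1, 2, 2, 3], 2, "lower")

def Spec_findBound (arr : List Int) (tgt : Int) (bound : String) (out : Int) : Prop := out = findBound_alt arr tgt bound
instance (arr : List Int) (tgt : Int) (bound : String) (out : Int) : Decidable (Spec_findBound arr tgt bound out) := by unfold Spec_findBound; infer_instance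

-- ===== CLAIM (what is proved, stated in full; the proofs are below) =====
def Claim_equal_findBound : Prop := ∀ (arr : List Int) (tgt : Int) (bound : String), Dom_findBound arr tgt bound → Pre_findBound arr tgt bound → Spec_findBound arr tgt bound (findBound arr tgt bound)

-- ===== LEMMAS AND PROOFS =====

-- monotone access on a sorted list
lemma sorted_getD {arr : List Int} (hS : arr.Pairwise (· ≤ ·)) {i j : Nat}
    (hij : i ≤ j) (hj : j < arr.length) : arr.getD i 0 ≤ arr.getD j 0 := by
  rcases Nat.lt_or_ge i j with h | h
  · rw [List.getD_eq_getElem _ _ (by omega), List.getD_eq_getElem _ _ hj]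
    exact (List.pairwise_iff_getElem.mp hS) i j (by omega) hj h
  · have : i = j := by omega
    subst this; rfl

-- r is the lower insertion point of tgt in arr
def LBpt (arr : List Int) (tgt : Int) (r : Nat) : Prop :=
  r ≤ arr.length ∧ (∀ i < r, arr.getD i 0 < tgt) ∧
    (∀ i, r ≤ i → i < arr.length → tgt ≤ arr.getD i 0)

-- r is the upper insertion point of tgt in arr
def UBpt (arr : List Int) (tgt : Int) (r : Nat) : Prop :=
  r ≤ arr.length ∧ (∀ i < r, arr.getD i 0 ≤ tgt) ∧
    (∀ i, r ≤ i → i < arr.length → tgt < arr.getD i 0)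

lemma LBpt_unique {arr : List Int} {tgt : Int} {r s : Nat}
    (hr : LBpt arr tgt r) (hs : LBpt arr tgt s) : r = s := by
  obtain ⟨hrn, hrl, hrg⟩ := hr; obtain ⟨hsn, hsl, hsg⟩ := hs
  by_contra hne
  rcases Nat.lt_or_ge r s with h | h
  · exact absurd (hsl r h) (not_lt.mpr (hrg r le_rfl (by omega)))
  · have h' : s < r := by omega
    exact absurd (hrl s h') (not_lt.mpr (hsg s le_rfl (by omega)))

lemma UBpt_unique {arr : List Int} {tgt : Int} {r s : Nat}
    (hr : UBpt arr tgt r) (hs : UBpt arr tgt s) : r = s := by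
  obtain ⟨hrn, hrl, hrg⟩ := hr; obtain ⟨hsn, hsl, hsg⟩ := hs
  by_contra hne
  rcases Nat.lt_or_ge r s with h | h
  · exact absurd (hsl r h) (not_le.mpr (hrg r le_rfl (by omega)))
  · have h' : s < r := by omega
    exact absurd (hrl s h') (not_le.mpr (hsg s le_rfl (by omega)))

lemma bisLow_spec {arr : List Int} {tgt : Int} (hS : arr.Pairwise (· ≤ ·)) :
    ∀ k lo hi, hi - lo ≤ k → lo ≤ hi → hi ≤ arr.length →
      (∀ i < lo, arr.getD i 0 < tgt) →
      (∀ i, hi ≤ i → i < arr.length → tgt ≤ arr.getD i 0) →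
      LBpt arr tgt (bisLow arr tgt lo hi) := by
  intro k
  induction k with
  | zero =>
    intro lo hi hk hlh hhn hl hh
    rw [bisLow]; have : ¬ lo < hi := by omega
    simp only [this, dite_false]
    exact ⟨by omega, hl, fun i hi' hin => hh i (by omega) hin⟩
  | succ k ih =>
    intro lo hi hk hlh hhn hl hh
    rw [bisLow]
    by_cases h : lo < hi
    · simp only [h, dite_true]
      by_cases hv : arr.getD ((lo + hi) / 2) 0 < tgt
      · simp only [hv, if_true]
        exact ih ((lo + hi) / 2 + 1) hi (by omega) (by omega) hhn
          (fun i hi' => lt_of_le_of_lt (sorted_getD hS (by omega) (by omega)) hv) hh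
      · simp only [hv, if_false]
        exact ih lo ((lo + hi) / 2) (by omega) (by omega) (by omega) hl
          (fun i hi' hin => le_trans (not_lt.mp hv) (sorted_getD hS (by omega) hin))
    · simp only [h, dite_false]
      exact ⟨by omega, hl, fun i hi' hin => hh i (by omega) hin⟩

lemma bisUp_spec {arr : List Int} {tgt : Int} (hS : arr.Pairwise (· ≤ ·)) :
    ∀ k lo hi, hi - lo ≤ k → lo ≤ hi → hi ≤ arr.length →
      (∀ i < lo, arr.getD i 0 ≤ tgt) →
      (∀ i, hi ≤ i → i < arr.length → tgt < arr.getD i 0) →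
      UBpt arr tgt (bisUp arr tgt lo hi) := by
  intro k
  induction k with
  | zero =>
    intro lo hi hk hlh hhn hl hh
    rw [bisUp]; have : ¬ lo < hi := by omega
    simp only [this, dite_false]
    exact ⟨by omega, hl, fun i hi' hin => hh i (by omega) hin⟩
  | succ k ih =>
    intro lo hi hk hlh hhn hl hh
    rw [bisUp]
    by_cases h : lo < hi
    · simp only [h, dite_true]
      by_cases hv : arr.getD ((lo + hi) / 2) 0 ≤ tgt
      · simp only [hv, if_true]
        exact ih ((lo + hi) / 2 + 1) hi (by omega) (by omega) hhn
          (fun i hi' => le_trans (sorted_getD hS (by omega) (by omega)) hv) hh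
      · simp only [hv, if_false]
        exact ih lo ((lo + hi) / 2) (by omega) (by omega) (by omega) hl
          (fun i hi' hin => lt_of_lt_of_le (not_le.mp hv) (sorted_getD hS (by omega) hin))
    · simp only [h, dite_false]
      exact ⟨by omega, hl, fun i hi' hin => hh i (by omega) hin⟩

lemma pyGetD_toNat {arr : List Int} {i : Int} (h0 : 0 ≤ i) (h1 : i < (arr.length : Int)) :
    PySem.List.pyGetD arr i 0 = arr.getD i.toNat 0 := by
  rw [PySem.List.pyGetD_eq_getElem arr 0 h0 h1, List.getD_eq_getElem arr 0 (by omega)]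

lemma lower_exit {arr : List Int} {tgt : Int} {r : Nat} (hr : LBpt arr tgt r)
    {left right : Int} (hlr : right < left)
    (H1 : ∀ i : Nat, (i : Int) < left → arr.getD i 0 < tgt)
    (H2 : ∀ j : Nat, j < arr.length → arr.getD j 0 = tgt →
      (∀ k' < j, arr.getD k' 0 ≠ tgt) → (j : Int) ≤ right) :
    ¬ (r < arr.length ∧ arr.getD r 0 = tgt) := by
  rintro ⟨hrn, hrt⟩
  obtain ⟨_, hrl, _⟩ := hr
  have h2 := H2 r hrn hrt (fun k' hk' => ne_of_lt (hrl k' hk'))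
  have h1 : ¬ ((r : Int) < left) := fun h => absurd hrt (ne_of_lt (H1 r h))
  omega

lemma upper_exit {arr : List Int} {tgt : Int} {r : Nat} (hr : UBpt arr tgt r)
    {left right : Int} (hlr : right < left)
    (H1 : ∀ i : Nat, (i : Int) > right → i < arr.length → tgt < arr.getD i 0)
    (H2 : ∀ j : Nat, j < arr.length → arr.getD j 0 = tgt →
      (∀ k', j < k' → k' < arr.length → arr.getD k' 0 ≠ tgt) → left ≤ (j : Int)) :
    ¬ (0 < r ∧ arr.getD (r - 1) 0 = tgt) := by
  rintro ⟨h0, ht⟩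
  obtain ⟨hrn, hrl, hrg⟩ := hr
  have h2 := H2 (r - 1) (by omega) ht (fun k' hk1 hk2 => ne_of_gt (hrg k' (by omega) hk2))
  have h1 : ¬ (((r - 1 : Nat) : Int) > right) := fun h => absurd ht (ne_of_gt (H1 (r - 1) h (by omega)))
  omega

lemma loopA_lower {arr : List Int} {tgt : Int} (hS : arr.Pairwise (· ≤ ·)) {r : Nat}
    (hr : LBpt arr tgt r) :
    ∀ k (left right : Int), (right + 1 - left).toNat ≤ k → 0 ≤ left →
      right ≤ (arr.length : Int) - 1 →
      (∀ i : Nat, (i : Int) < left → arr.getD i 0 < tgt) →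
      (∀ j : Nat, j < arr.length → arr.getD j 0 = tgt →
        (∀ k' < j, arr.getD k' 0 ≠ tgt) → (j : Int) ≤ right) →
      loopA arr tgt "lower" left right =
        if r < arr.length ∧ arr.getD r 0 = tgt then (r : Int) else -1 := by
  intro k
  induction k with
  | zero =>
    intro left right hk h0 hrn H1 H2
    rw [loopA]
    have hnl : ¬ left ≤ right := by omega
    rw [dif_neg hnl, if_neg (lower_exit hr (by omega) H1 H2)]
  | succ k ih =>
    intro left right hk h0 hrn H1 H2
    rw [loopA]
    by_cases hlr : left ≤ right
    · have hmb := PySem.Int.floordiv_two_mid_bounds (lo := left) (hi := right) hlr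
      rw [dif_pos hlr]
      set m := PySem.Int.floordiv (left + right) 2 with hm
      have hmn : m < (arr.length : Int) := by omega
      have hm0 : 0 ≤ m := by omega
      have hcast : ((m.toNat : Int)) = m := by omega
      have hget : PySem.List.pyGetD arr m 0 = arr.getD m.toNat 0 := pyGetD_toNat hm0 hmn
      simp only [hget, beq_iff_eq, PySem.List.len_eq]
      by_cases hv : arr.getD m.toNat 0 = tgt
      · rw [if_pos hv]; simp only [if_true]
        by_cases hml : m = left
        · -- mid == left: return mid, which is the lower insertion point
          rw [if_pos hml]
          have hM : LBpt arr tgt m.toNat :=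
            ⟨by omega, fun i hi => H1 i (by omega),
             fun i hi hin => hv ▸ sorted_getD hS hi hin⟩
          rw [LBpt_unique hr hM, if_pos ⟨by omega, hv⟩]; omega
        · rw [if_neg hml]
          have hget1 : PySem.List.pyGetD arr (m - 1) 0 = arr.getD (m.toNat - 1) 0 := by
            rw [pyGetD_toNat (by omega) (by omega)]; congr 1; omega
          rw [hget1]
          by_cases hprev : arr.getD (m.toNat - 1) 0 < tgt
          · -- arr[mid-1] < tgt: return mid
            rw [if_pos hprev]
            have hM : LBpt arr tgt m.toNat :=
              ⟨by omega,
               fun i hi => lt_of_le_of_lt (sorted_getD hS (by omega) (by omega)) hprev,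
               fun i hi hin => hv ▸ sorted_getD hS hi hin⟩
            rw [LBpt_unique hr hM, if_pos ⟨by omega, hv⟩]; omega
          · -- not leftmost: recurse with right := mid - 1
            rw [if_neg hprev]
            have heq : arr.getD (m.toNat - 1) 0 = tgt :=
              le_antisymm (hv ▸ sorted_getD hS (by omega) (by omega)) (not_lt.mp hprev)
            refine ih left (m - 1) (by omega) h0 (by omega) H1 ?_
            intro j hj hjt hjmin
            by_contra hc
            exact hjmin (m.toNat - 1) (by omega) heq
      · rw [if_neg hv]
        by_cases hlt : arr.getD m.toNat 0 < tgt
        · -- arr[mid] < tgt: recurse with left := mid + 1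
          rw [if_pos hlt]
          refine ih (m + 1) right (by omega) (by omega) hrn ?_ H2
          intro i hi
          exact lt_of_le_of_lt (sorted_getD hS (by omega) (by omega)) hlt
        · -- arr[mid] > tgt: recurse with right := mid - 1
          rw [if_neg hlt]
          have hgt : tgt < arr.getD m.toNat 0 := lt_of_le_of_ne (not_lt.mp hlt) (Ne.symm hv)
          refine ih left (m - 1) (by omega) h0 (by omega) H1 ?_
          intro j hj hjt hjmin
          have : j < m.toNat := by
            by_contra hc
            exact absurd hjt (ne_of_gt (lt_of_lt_of_le hgt (sorted_getD hS (by omega) hj)))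
          omega
    · rw [dif_neg hlr, if_neg (lower_exit hr (by omega) H1 H2)]

lemma loopA_upper {arr : List Int} {tgt : Int} {bound : String}
    (hS : arr.Pairwise (· ≤ ·)) (hb : (bound == "lower") = false) {r : Nat}
    (hr : UBpt arr tgt r) :
    ∀ k (left right : Int), (right + 1 - left).toNat ≤ k → 0 ≤ left →
      right ≤ (arr.length : Int) - 1 →
      (∀ i : Nat, (i : Int) > right → i < arr.length → tgt < arr.getD i 0) →
      (∀ j : Nat, j < arr.length → arr.getD j 0 = tgt →
        (∀ k', j < k' → k' < arr.length → arr.getD k' 0 ≠ tgt) → left ≤ (j : Int)) →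
      loopA arr tgt bound left right =
        if 0 < r ∧ arr.getD (r - 1) 0 = tgt then (r : Int) - 1 else -1 := by
  intro k
  induction k with
  | zero =>
    intro left right hk h0 hrn H1 H2
    rw [loopA]
    have hnl : ¬ left ≤ right := by omega
    rw [dif_neg hnl, if_neg (upper_exit hr (by omega) H1 H2)]
  | succ k ih =>
    intro left right hk h0 hrn H1 H2
    rw [loopA]
    by_cases hlr : left ≤ right
    · have hmb := PySem.Int.floordiv_two_mid_bounds (lo := left) (hi := right) hlr
      rw [dif_pos hlr]
      set m := PySem.Int.floordiv (left + right) 2 with hm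
      have hmn : m < (arr.length : Int) := by omega
      have hm0 : 0 ≤ m := by omega
      have hcast : ((m.toNat : Int)) = m := by omega
      have hget : PySem.List.pyGetD arr m 0 = arr.getD m.toNat 0 := pyGetD_toNat hm0 hmn
      simp only [hget, hb, Bool.false_eq_true, if_false, beq_iff_eq, PySem.List.len_eq]
      by_cases hv : arr.getD m.toNat 0 = tgt
      · rw [if_pos hv]
        by_cases hm1 : m = (arr.length : Int) - 1
        · -- mid == len-1: return mid, the upper point is mid+1
          rw [if_pos hm1]
          have hM : UBpt arr tgt (m.toNat + 1) :=
            ⟨by omega, fun i hi => hv ▸ sorted_getD hS (by omega) (by omega),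
             fun i hi hin => absurd hin (by omega)⟩
          rw [UBpt_unique hr hM, if_pos ⟨by omega, by simpa using hv⟩]
          push_cast; omega
        · rw [if_neg hm1]
          have hget2 : PySem.List.pyGetD arr (m + 1) 0 = arr.getD (m.toNat + 1) 0 := by
            rw [pyGetD_toNat (by omega) (by omega)]; congr 1; omega
          rw [hget2]
          by_cases hnext : tgt < arr.getD (m.toNat + 1) 0
          · -- tgt < arr[mid+1]: return mid
            rw [if_pos hnext]
            have hM : UBpt arr tgt (m.toNat + 1) :=
              ⟨by omega, fun i hi => hv ▸ sorted_getD hS (by omega) (by omega),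
               fun i hi hin => lt_of_lt_of_le hnext (sorted_getD hS (by omega) hin)⟩
            rw [UBpt_unique hr hM, if_pos ⟨by omega, by simpa using hv⟩]
            push_cast; omega
          · -- not rightmost: recurse with left := mid + 1
            rw [if_neg hnext]
            have heq : arr.getD (m.toNat + 1) 0 = tgt :=
              le_antisymm (not_lt.mp hnext) (hv ▸ sorted_getD hS (by omega) (by omega))
            refine ih (m + 1) right (by omega) (by omega) hrn H1 ?_
            intro j hj hjt hjmax
            by_contra hc
            exact hjmax (m.toNat + 1) (by omega) (by omega) heq
      · rw [if_neg hv]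
        by_cases hlt : arr.getD m.toNat 0 < tgt
        · -- arr[mid] < tgt: recurse with left := mid + 1
          rw [if_pos hlt]
          refine ih (m + 1) right (by omega) (by omega) hrn H1 ?_
          intro j hj hjt hjmax
          have : m.toNat < j := by
            by_contra hc
            exact absurd hjt (ne_of_lt (lt_of_le_of_lt (sorted_getD hS (by omega) (by omega)) hlt))
          omega
        · -- arr[mid] > tgt: recurse with right := mid - 1
          rw [if_neg hlt]
          have hgt : tgt < arr.getD m.toNat 0 := lt_of_le_of_ne (not_lt.mp hlt) (Ne.symm hv)
          refine ih left (m - 1) (by omega) h0 (by omega) ?_ H2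
          intro i hi hin
          exact lt_of_lt_of_le hgt (sorted_getD hS (by omega) hin)
    · rw [dif_neg hlr, if_neg (upper_exit hr (by omega) H1 H2)]

lemma loopA_notmem {arr : List Int} {tgt : Int} {bound : String} (hnm : tgt ∉ arr) :
    ∀ k (left right : Int), (right + 1 - left).toNat ≤ k → 0 ≤ left →
      right ≤ (arr.length : Int) - 1 → loopA arr tgt bound left right = -1 := by
  intro k
  induction k with
  | zero =>
    intro left right hk h0 hrn
    rw [loopA, dif_neg (by omega)]
  | succ k ih =>
    intro left right hk h0 hrn
    rw [loopA]
    by_cases hlr : left ≤ right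
    · have hmb := PySem.Int.floordiv_two_mid_bounds (lo := left) (hi := right) hlr
      rw [dif_pos hlr]
      set m := PySem.Int.floordiv (left + right) 2 with hm
      have hget : PySem.List.pyGetD arr m 0 = arr.getD m.toNat 0 :=
        pyGetD_toNat (by omega) (by omega)
      have hmem : arr.getD m.toNat 0 ∈ arr := by
        rw [List.getD_eq_getElem arr 0 (by omega)]; exact List.getElem_mem _
      have hne : arr.getD m.toNat 0 ≠ tgt := fun h => hnm (h ▸ hmem)
      simp only [hget, beq_iff_eq]
      rw [if_neg hne]
      by_cases hlt : arr.getD m.toNat 0 < tgt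
      · rw [if_pos hlt]; exact ih (m + 1) right (by omega) (by omega) hrn
      · rw [if_neg hlt]; exact ih left (m - 1) (by omega) h0 (by omega)
    · rw [dif_neg hlr]

lemma bisUp_le {arr : List Int} {tgt : Int} :
    ∀ k lo hi, hi - lo ≤ k → lo ≤ hi → bisUp arr tgt lo hi ≤ hi := by
  intro k
  induction k with
  | zero => intro lo hi hk hlh; rw [bisUp, dif_neg (by omega)]; omega
  | succ k ih =>
    intro lo hi hk hlh
    rw [bisUp]
    by_cases h : lo < hi
    · rw [dif_pos h]
      by_cases hv : arr.getD ((lo + hi) / 2) 0 ≤ tgt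
      · rw [if_pos hv]; exact ih ((lo + hi) / 2 + 1) hi (by omega) (by omega)
      · rw [if_neg hv]; exact le_trans (ih lo ((lo + hi) / 2) (by omega) (by omega)) (by omega)
    · rw [dif_neg h]; omega

lemma getD_ne_of_notmem {arr : List Int} {tgt : Int} {i : Nat} (hnm : tgt ∉ arr)
    (hi : i < arr.length) : arr.getD i 0 ≠ tgt := by
  intro h
  exact hnm (h ▸ (List.getD_eq_getElem arr 0 hi ▸ List.getElem_mem _))

-- ===== VERDICT (by name: the statement is the Claim_ definition above) =====
theorem findBound_spec : Claim_equal_findBound := by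
  intro arr tgt bound _hDom hPre
  unfold Spec_findBound findBound findBound_alt
  rcases hPre with hS | hnm
  · by_cases hb : (bound == "lower") = true
    · have hbl : bound = "lower" := by simpa using hb
      subst hbl
      simp only [beq_self_eq_true, if_true]
      have hr := bisLow_spec (tgt := tgt) hS arr.length 0 arr.length (by omega) (by omega) le_rfl
        (fun i hi => absurd hi (by omega)) (fun i h1 h2 => absurd h2 (by omega))
      rw [PySem.List.len_eq]
      have := loopA_lower hS hr arr.length 0 ((arr.length : Int) - 1) (by omega) le_rfl
        (by omega) (fun i hi => absurd hi (by omega)) (fun j hj _ _ => by omega)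
      rw [this]
    · have hb' : (bound == "lower") = false := by simpa using hb
      simp only [hb']
      have hr := bisUp_spec (tgt := tgt) hS arr.length 0 arr.length (by omega) (by omega) le_rfl
        (fun i hi => absurd hi (by omega)) (fun i h1 h2 => absurd h2 (by omega))
      rw [PySem.List.len_eq]
      have := loopA_upper hS hb' hr arr.length 0 ((arr.length : Int) - 1) (by omega) le_rfl
        (by omega) (fun i hi hin => absurd hin (by omega)) (fun j hj _ _ => by omega)
      rw [this]
      simp
  · -- tgt does not occur in arr: both sides return -1 outright
    rw [PySem.List.len_eq, loopA_notmem hnm arr.length 0 ((arr.length : Int) - 1)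
      (by omega) le_rfl (by omega)]
    by_cases hb : (bound == "lower") = true
    · simp only [hb, if_true]
      by_cases hlo : bisLow arr tgt 0 arr.length < arr.length
      · have hne : ¬ (bisLow arr tgt 0 arr.length < arr.length ∧
            arr.getD (bisLow arr tgt 0 arr.length) 0 = tgt) := by
          rintro ⟨h1, h2⟩
          exact getD_ne_of_notmem hnm h1 h2
        rw [if_neg hne]
      · rw [if_neg (fun h => hlo h.1)]
    · have hbf : (bound == "lower") = false := by simpa using hb
      simp only [hbf, Bool.false_eq_true, if_false]
      have hle := bisUp_le (arr := arr) (tgt := tgt) arr.length 0 arr.length (by omega) (by omega)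
      have hne : ¬ (0 < bisUp arr tgt 0 arr.length ∧
          arr.getD (bisUp arr tgt 0 arr.length - 1) 0 = tgt) := by
        rintro ⟨h1, h2⟩
        exact getD_ne_of_notmem hnm (by omega) h2
      rw [if_neg hne]
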